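-- pv_equiv track=rewrite | github.com/matsuolab/lecture-ai-engineering | day3/get_text.py | is_informative
-- ===== SOURCE A (Python) =====
-- def is_informative(text):
--     common_words = {'the', 'be', 'to', 'of', 'and', 'a', 'in', 'that', 'have', 'i'}
--     words = text.split()
--
--     # Check minimum length
--     if len(words) < 50:
--         return False
--
--     # Check for common words
--     common_word_count = sum(1 for word in words if word in common_words)
--     if common_word_count < 5:
--         return False
--
--     return True
-- ===== SOURCE B (Python) =====
-- COMMON = ('the', 'be', 'to', 'of', 'and', 'a', 'in', 'that', 'have', 'i')
--
-- def is_informative(text):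
--     n = 0
--     hits = 0
--     for w in text.split():
--         n += 1
--         if hits < 5 and w in COMMON:
--             hits += 1
--         if n >= 50 and hits >= 5:
--             return True
--     return False
-- ===== Notes on version B (the rewrite author's own statement) =====
-- stated objective: alternative
-- what changed: Replaces A's two staged full counts (count all words, then count all common-word occurrences, then compare) with a single streaming pass keeping a word counter and a saturating hit counter (capped at 5) that returns True early the moment both thresholds are reached, never finishing the scan.
import Mathlib
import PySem

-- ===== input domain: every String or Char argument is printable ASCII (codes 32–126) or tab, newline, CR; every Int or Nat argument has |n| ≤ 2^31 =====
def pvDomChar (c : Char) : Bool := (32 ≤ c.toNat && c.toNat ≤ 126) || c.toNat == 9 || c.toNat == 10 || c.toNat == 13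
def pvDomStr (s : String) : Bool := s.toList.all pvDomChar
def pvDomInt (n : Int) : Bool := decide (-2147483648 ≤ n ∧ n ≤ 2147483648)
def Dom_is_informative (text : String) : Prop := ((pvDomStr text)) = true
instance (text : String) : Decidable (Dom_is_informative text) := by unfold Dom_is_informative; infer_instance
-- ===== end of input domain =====

-- B replaces A's two staged full counts with one streaming pass over the words: a word
-- counter and a hit counter saturating at 5, returning True early once both thresholds
-- are reached (alternative decomposition; same asymptotic cost).


-- ===== PORT A =====
def is_informative (text : String) : Bool :=
  let common_words : List String :=
    PySem.Set.ofList ["the", "be", "to", "of", "and", "a", "in", "that", "have", "i"]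
  let words := PySem.Str.split₀ text
  if words.length < 50 then false
  else
    let common_word_count : Int :=
      words.foldl (fun acc word => if word ∈ common_words then acc + 1 else acc) 0
    if common_word_count < 5 then false
    else true

-- ===== PORT B =====
-- B's fixed tuple of common words
def pvCommon : List String := ["the", "be", "to", "of", "and", "a", "in", "that", "have", "i"]

-- B's for-loop: word counter n, saturating hit counter hits, early return True
def pvScan : List String → Int → Int → Bool
  | [], _, _ => false
  | w :: ws, n, hits =>
    let n' := n + 1
    let hits' := if hits < 5 ∧ w ∈ pvCommon then hits + 1 else hits
    if 50 ≤ n' ∧ 5 ≤ hits' then true else pvScan ws n' hits'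

def is_informative_alt (text : String) : Bool :=
  pvScan (PySem.Str.split₀ text) 0 0

-- ===== PRECONDITION & SPEC =====
def Spec_is_informative (text : String) (out : Bool) : Prop := out = is_informative_alt text
instance (text : String) (out : Bool) : Decidable (Spec_is_informative text out) := by unfold Spec_is_informative; infer_instance

-- ===== CLAIM (what is proved, stated in full; the proofs are below) =====
def Claim_equal_is_informative : Prop := ∀ (text : String), Dom_is_informative text → Spec_is_informative text (is_informative text)

-- ===== LEMMAS AND PROOFS =====

-- the streaming loop returns true iff both final totals meet the thresholds
lemma pvScan_spec (ws : List String) (n hits : Int) (h5 : hits ≤ 5)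
    (hpre : ¬ (50 ≤ n ∧ 5 ≤ hits)) :
    pvScan ws n hits
      = decide (50 ≤ n + ws.length ∧ 5 ≤ hits + ((ws.countP (fun w => decide (w ∈ pvCommon)) : Nat) : Int)) := by
  induction ws generalizing n hits with
  | nil =>
    simp only [pvScan, List.length_nil, List.countP_nil]
    symm; rw [decide_eq_false_iff_not]
    intro h
    exact hpre ⟨by omega, by omega⟩
  | cons w ws ih =>
    simp only [pvScan, List.length_cons, List.countP_cons]
    by_cases hm : hits < 5 ∧ w ∈ pvCommon
    · rw [if_pos hm]
      have hmem : (decide (w ∈ pvCommon)) = true := decide_eq_true hm.2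
      rw [hmem, if_pos rfl]
      by_cases hret : 50 ≤ n + 1 ∧ 5 ≤ hits + 1
      · rw [if_pos hret]
        symm; rw [decide_eq_true_iff]
        push_cast
        omega
      · rw [if_neg hret, ih (n + 1) (hits + 1) (by omega) hret]
        rw [decide_eq_decide]
        push_cast
        omega
    · rw [if_neg hm]
      by_cases hret : 50 ≤ n + 1 ∧ 5 ≤ hits
      · rw [if_pos hret]
        symm; rw [decide_eq_true_iff]
        -- hits = 5 forces the hit total ≥ 5 regardless of the remaining count
        by_cases hw : w ∈ pvCommon
        · rw [decide_eq_true hw, if_pos rfl]; push_cast; omega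
        · rw [decide_eq_false hw, if_neg (by simp)]; push_cast; omega
      · rw [if_neg hret, ih (n + 1) hits h5 hret, decide_eq_decide]
        by_cases hw : w ∈ pvCommon
        · have h5' : hits = 5 := by
            have : ¬ hits < 5 := fun hlt => hm ⟨hlt, hw⟩
            omega
          rw [decide_eq_true hw, if_pos rfl]
          subst h5'
          push_cast
          omega
        · rw [decide_eq_false hw, if_neg (by simp)]
          push_cast
          omega

-- ===== VERDICT (by name: the statement is the Claim_ definition above) =====
theorem is_informative_spec : Claim_equal_is_informative := by
  intro text _
  unfold Spec_is_informative is_informative is_informative_alt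
  have hset : PySem.Set.ofList ["the", "be", "to", "of", "and", "a", "in", "that", "have", "i"] = pvCommon := by decide
  set ws := PySem.Str.split₀ text with hws
  rw [pvScan_spec ws 0 0 (by omega) (by omega)]
  simp only [hset]
  have hA : ws.foldl (fun acc word => if word ∈ pvCommon then acc + 1 else acc) (0:Int)
      = ((ws.countP (fun w => decide (w ∈ pvCommon)) : Nat) : Int) := by
    rw [PySem.List.foldl_ite_add_one]; ring
  by_cases hlen : ws.length < 50
  · rw [if_pos hlen]
    symm; rw [decide_eq_false_iff_not]
    intro h
    have := h.1
    push_cast at this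
    omega
  · rw [if_neg hlen, hA]
    by_cases hc : ((ws.countP (fun w => decide (w ∈ pvCommon)) : Nat) : Int) < 5
    · rw [if_pos hc]
      symm; rw [decide_eq_false_iff_not]
      intro h
      have := h.2
      omega
    · rw [if_neg hc]
      symm; rw [decide_eq_true_iff]
      refine ⟨by omega, by omega⟩
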